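-- pv_equiv track=rewrite | github.com/msgm68dev/Xebel | files/thesis-codes/code/MyRouting/dag_xebel.py | piece_inside_tuple
-- ===== SOURCE A (Python) =====
-- def piece_inside_tuple(inner:tuple, larger:tuple):
--     for i in range(len(larger)):
--         if inner[0] == larger[i]:
--             end = i + len(inner)
--             if len(larger) < end:
--                 return False
--             if larger[i:end] == inner:
--                 return True
--     return False
-- ===== SOURCE B (Python) =====
-- def _matches_at(p, t, off):
--     # does p occur in t starting exactly at offset off?
--     if len(t) - off < len(p):
--         return False
--     for j in range(len(p)):
--         if p[j] != t[off + j]: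
--             return False
--     return True
--
-- def piece_inside_tuple(inner, larger):
--     # scan every suffix of larger for inner as a prefix (elementwise, no slicing)
--     off = 0
--     while True:
--         if _matches_at(inner, larger, off):
--             return True
--         if off >= len(larger):
--             return False
--         off += 1
-- ===== Notes on version B (the rewrite author's own statement) =====
-- stated objective: alternative
-- what changed: replaces A's index loop with first-element filter, bounds early-return and slice comparison by a plain scan of suffixes with an elementwise prefix test (no slicing, no special cases)
-- intended difference: on inner=() and larger=() A returns False (its loop never runs) although the empty tuple is contained in every tuple; B returns True, the intended value. — e.g. on piece_inside_tuple([], []): A returns false, B returns true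
import Mathlib
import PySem

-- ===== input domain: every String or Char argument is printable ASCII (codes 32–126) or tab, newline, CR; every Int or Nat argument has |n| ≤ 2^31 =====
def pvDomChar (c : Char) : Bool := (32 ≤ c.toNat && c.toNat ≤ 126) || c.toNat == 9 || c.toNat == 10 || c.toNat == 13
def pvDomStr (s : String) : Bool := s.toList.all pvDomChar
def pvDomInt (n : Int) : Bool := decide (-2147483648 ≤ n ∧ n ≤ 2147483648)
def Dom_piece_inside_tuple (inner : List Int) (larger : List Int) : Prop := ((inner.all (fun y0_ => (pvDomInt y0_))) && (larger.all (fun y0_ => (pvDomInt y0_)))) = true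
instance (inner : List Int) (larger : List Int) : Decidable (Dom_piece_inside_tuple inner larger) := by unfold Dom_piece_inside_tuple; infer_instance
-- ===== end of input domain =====

-- B scans suffixes with an elementwise prefix test instead of A's index loop with
-- first-element filter, bounds early-return and slice comparison; return values only.

-- ===== PORT A =====
-- the for-loop over range(len(larger)) with early returns, as a recursion on the index i
def pieceGoA (inner larger : List Int) (i : Nat) : Bool :=
  if h : i < larger.length then
    (if PySem.List.pyGet? inner 0 == some larger[i] then
      -- end = i + len(inner)
      if larger.length < i + inner.length then false
      else if PySem.List.slice larger (some (i : Int)) (some ((i + inner.length : Nat) : Int)) == inner then true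
      else pieceGoA inner larger (i + 1)
    else pieceGoA inner larger (i + 1))
  else false
termination_by larger.length - i

def piece_inside_tuple (inner : List Int) (larger : List Int) : Bool :=
  pieceGoA inner larger 0

-- ===== PORT B =====
-- _matches_at: length guard, then elementwise comparison of p against the suffix
def pvPrefEq : List Int → List Int → Bool
  | [], _ => true
  | _ :: _, [] => false
  | a :: p, b :: t => a == b && pvPrefEq p t
def pvMatches (p t : List Int) : Bool :=
  if t.length < p.length then false else pvPrefEq p t

-- the while-loop over offsets; the offset off denotes the suffix larger.drop off
def pvSearch (p : List Int) : List Int → Bool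
  | [] => if pvMatches p [] then true else false
  | a :: t => if pvMatches p (a :: t) then true else pvSearch p t

def piece_inside_tuple_alt (inner : List Int) (larger : List Int) : Bool :=
  pvSearch inner larger

-- ===== PRECONDITION & SPEC =====
-- Pre_ excludes empty inner with nonempty larger: there A raises IndexError at inner[0].
def Pre_piece_inside_tuple (inner : List Int) (larger : List Int) : Prop :=
  inner ≠ [] ∨ larger = []
instance (inner : List Int) (larger : List Int) : Decidable (Pre_piece_inside_tuple inner larger) := by unfold Pre_piece_inside_tuple; infer_instance
def pvWitness_piece_inside_tuple : List Int × List Int := ([1, 2], [3, 1, 2, 4])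

-- on inner = [] and larger = [] A returns false (its loop never runs) although the empty
-- tuple is contained in every tuple; B returns true, the intended value.
def D_piece_inside_tuple (inner : List Int) (larger : List Int) : Prop :=
  inner = [] ∧ larger = []
instance (inner : List Int) (larger : List Int) : Decidable (D_piece_inside_tuple inner larger) := by unfold D_piece_inside_tuple; infer_instance

def Spec_piece_inside_tuple (inner : List Int) (larger : List Int) (out : Bool) : Prop :=
  ¬ D_piece_inside_tuple inner larger → out = piece_inside_tuple_alt inner larger
instance (inner : List Int) (larger : List Int) (out : Bool) : Decidable (Spec_piece_inside_tuple inner larger out) := by unfold Spec_piece_inside_tuple; infer_instance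

def pvDiffWitness_piece_inside_tuple : List Int × List Int := ([], [])
def pvDiffWitnessOut_piece_inside_tuple : Bool × Bool := (false, true)

-- ===== CLAIM (what is proved, stated in full; the proofs are below) =====
def Claim_unchanged_piece_inside_tuple : Prop := ∀ (inner : List Int) (larger : List Int), Dom_piece_inside_tuple inner larger → Pre_piece_inside_tuple inner larger → Spec_piece_inside_tuple inner larger (piece_inside_tuple inner larger)
def Claim_changed_piece_inside_tuple : Prop := Dom_piece_inside_tuple (pvDiffWitness_piece_inside_tuple.1) (pvDiffWitness_piece_inside_tuple.2) ∧ Pre_piece_inside_tuple (pvDiffWitness_piece_inside_tuple.1) (pvDiffWitness_piece_inside_tuple.2) ∧ D_piece_inside_tuple (pvDiffWitness_piece_inside_tuple.1) (pvDiffWitness_piece_inside_tuple.2) ∧ piece_inside_tuple (pvDiffWitness_piece_inside_tuple.1) (pvDiffWitness_piece_inside_tuple.2) = pvDiffWitnessOut_piece_inside_tuple.1 ∧ piece_inside_tuple_alt (pvDiffWitness_piece_inside_tuple.1) (pvDiffWitness_piece_inside_tuple.2) = pvDiffWitnessOut_piece_inside_tuple.2 ∧ pvDiffWitnessOut_piece_inside_tuple.1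 ≠ pvDiffWitnessOut_piece_inside_tuple.2
def Claim_exact_piece_inside_tuple : Prop := ∀ (inner : List Int) (larger : List Int), Dom_piece_inside_tuple inner larger → Pre_piece_inside_tuple inner larger → D_piece_inside_tuple inner larger → piece_inside_tuple inner larger ≠ piece_inside_tuple_alt inner larger

-- ===== LEMMAS AND PROOFS =====

lemma pvPrefEq_iff : ∀ (p t : List Int), p.length ≤ t.length → (pvPrefEq p t = true ↔ t.take p.length = p)
  | [], t, _ => by simp [pvPrefEq]
  | a :: p, [], h => by simp at h
  | a :: p, b :: t, h => by
    simp only [pvPrefEq, List.length_cons, List.take_succ_cons, Bool.and_eq_true, beq_iff_eq]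
    rw [pvPrefEq_iff p t (by simpa using h)]
    constructor
    · rintro ⟨h1, h2⟩; simp [h1, h2]
    · intro h1; injection h1 with h1 h2; exact ⟨h1.symm, h2⟩

lemma pvMatches_iff (p t : List Int) : pvMatches p t = true ↔ t.take p.length = p := by
  unfold pvMatches
  split
  · rename_i hlt
    simp only [Bool.false_eq_true, false_iff]
    intro h
    have := congrArg List.length h
    simp [Nat.min_def] at this
    omega
  · exact pvPrefEq_iff p t (by omega)

lemma pvMatches_false_of_short (p t : List Int) (h : t.length < p.length) : pvMatches p t = false := by
  unfold pvMatches; simp [h]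

lemma pvSearch_short (p : List Int) : ∀ t : List Int, t.length < p.length → pvSearch p t = false
  | [], h => by simp [pvSearch, pvMatches_false_of_short p [] h]
  | a :: t, h => by
    simp only [pvSearch, pvMatches_false_of_short p (a :: t) h, Bool.false_eq_true, if_false]
    exact pvSearch_short p t (by simp at h ⊢; omega)

lemma go_eq_aux (p larger : List Int) (hp : p ≠ []) :
    ∀ (k i : Nat), larger.length ≤ i + k → pieceGoA p larger i = pvSearch p (larger.drop i) := by
  intro k
  induction k with
  | zero =>
    intro i hk
    rw [pieceGoA]
    have h : ¬ i < larger.length := by omega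
    simp only [h, dif_neg, not_false_iff]
    rw [List.drop_of_length_le (by omega)]
    obtain ⟨x, ps, rfl⟩ := List.exists_cons_of_ne_nil hp
    rfl
  | succ k IH =>
    intro i hk
    by_cases h : i < larger.length
    case neg =>
      rw [pieceGoA]
      simp only [h, dif_neg, not_false_iff]
      rw [List.drop_of_length_le (by omega)]
      obtain ⟨x, ps, rfl⟩ := List.exists_cons_of_ne_nil hp
      rfl
    case pos =>
      have hdrop : larger.drop i = larger[i] :: larger.drop (i + 1) :=
        List.drop_eq_getElem_cons h
      have hIH : pieceGoA p larger (i + 1) = pvSearch p (larger.drop (i + 1)) :=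
        IH (i + 1) (by omega)
      rw [pieceGoA]
      simp only [h, dif_pos]
      obtain ⟨x, ps, rfl⟩ := List.exists_cons_of_ne_nil hp
      have hget : PySem.List.pyGet? (x :: ps) (0 : Int) = some x := by
        simp [PySem.List.pyGet?, PySem.List.pyIdx?]
      rw [hget]
      set pl := (x :: ps) with hpl
      rw [hdrop, pvSearch]
      by_cases hx : x = larger[i]
      case neg =>
        have hm : pvMatches pl (larger[i] :: larger.drop (i + 1)) = false := by
          rw [Bool.eq_false_iff]
          intro hmt
          rw [pvMatches_iff] at hmt
          simp only [hpl, List.length_cons, List.take_succ_cons] at hmt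
          exact hx (by injection hmt with h1 _; exact h1.symm)
        simp only [hm, beq_iff_eq, Option.some.injEq, hx, Bool.false_eq_true, if_false, hIH]
      case pos =>
        simp only [beq_iff_eq, hx, if_true]
        by_cases hlen : larger.length < i + pl.length
        case pos =>
          have hshort : (larger[i] :: larger.drop (i + 1)).length < pl.length := by
            simp only [List.length_cons, List.length_drop]; omega
          rw [pvMatches_false_of_short _ _ hshort]
          simp only [hlen, if_true, Bool.false_eq_true, if_false]
          exact (pvSearch_short pl _ (by simp only [List.length_cons, List.length_drop] at hshort ⊢; omega)).symm
        case neg =>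
          simp only [hlen, if_false]
          have hslice : PySem.List.slice larger (some (i : Int)) (some ((i + pl.length : Nat) : Int)) = (larger.drop i).take pl.length := by
            rw [show ((i + pl.length : Nat) : Int) = (i : Int) + (pl.length : Int) by push_cast; ring]
            exact PySem.List.slice_natCast_add larger i pl.length
          by_cases hsl : (larger.drop i).take pl.length = pl
          case pos =>
            have hc : PySem.List.slice larger (some (i : Int)) (some ((i + pl.length : Nat) : Int)) = pl := by
              rw [hslice]; exact hsl
            have hm : pvMatches pl (larger[i] :: larger.drop (i + 1)) = true := by
              rw [pvMatches_iff, ← hdrop]; exact hsl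
            rw [if_pos hc, if_pos hm]
          case neg =>
            have hc : ¬ (PySem.List.slice larger (some (i : Int)) (some ((i + pl.length : Nat) : Int)) = pl) := by
              rw [hslice]; exact hsl
            have hm : ¬ (pvMatches pl (larger[i] :: larger.drop (i + 1)) = true) := by
              rw [pvMatches_iff, ← hdrop]; exact hsl
            rw [if_neg hc, if_neg hm, hIH]

lemma go_eq (p larger : List Int) (hp : p ≠ []) :
    ∀ i : Nat, pieceGoA p larger i = pvSearch p (larger.drop i) := by
  intro i
  exact go_eq_aux p larger hp larger.length i (by omega)

-- ===== VERDICT (by name: the statement is the Claim_ definition above) =====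
theorem piece_inside_tuple_spec : Claim_unchanged_piece_inside_tuple := by
  intro inner larger _ hpre hnd
  by_cases hp : inner = []
  · subst hp
    rcases hpre with h | h
    · exact absurd rfl h
    · exact absurd ⟨rfl, h⟩ hnd
  · have := go_eq inner larger hp 0
    simpa [piece_inside_tuple, piece_inside_tuple_alt] using this

theorem piece_inside_tuple_changed : Claim_changed_piece_inside_tuple := by
  unfold Claim_changed_piece_inside_tuple
  refine ⟨by decide, by decide, by decide, ?_, by decide, by decide⟩
  show piece_inside_tuple [] [] = false
  rw [piece_inside_tuple, pieceGoA]; simp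

theorem piece_inside_tuple_tight : Claim_exact_piece_inside_tuple := by
  intro inner larger _ _ hd
  obtain ⟨h1, h2⟩ := hd; subst h1; subst h2
  have hA : piece_inside_tuple [] [] = false := by
    rw [piece_inside_tuple, pieceGoA]; simp
  rw [hA]; decide
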